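-- pv_equiv track=rewrite | github.com/blacksnowx/swebootcamp | w1d3/playfair_cipher.py | fix_same_letter_pairs
-- ===== SOURCE A (Python) =====
-- def fix_same_letter_pairs(string):
--     new_string = ""
--     for i in range(0, len(string)):
--         if i % 2 == 1 and string[i - 1] == string[i]:
--             new_string += "X"
--         else:
--             new_string += string[i]
--     return new_string
-- ===== SOURCE B (Python) =====
-- def fix_same_letter_pairs(string):
--     parts = []
--     for i in range(0, len(string), 2):
--         chunk = string[i:i + 2]
--         if len(chunk) == 2 and chunk[0] == chunk[1]:
--             parts.append(chunk[0] + "X")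
--         else:
--             parts.append(chunk)
--     return "".join(parts)
-- ===== Notes on version B (the rewrite author's own statement) =====
-- stated objective: alternative
-- what changed: B iterates over the string two characters at a time (pair chunks via a step-2 range and slicing) instead of scanning every index and branching on i % 2 with a backward lookup.
import Mathlib
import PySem

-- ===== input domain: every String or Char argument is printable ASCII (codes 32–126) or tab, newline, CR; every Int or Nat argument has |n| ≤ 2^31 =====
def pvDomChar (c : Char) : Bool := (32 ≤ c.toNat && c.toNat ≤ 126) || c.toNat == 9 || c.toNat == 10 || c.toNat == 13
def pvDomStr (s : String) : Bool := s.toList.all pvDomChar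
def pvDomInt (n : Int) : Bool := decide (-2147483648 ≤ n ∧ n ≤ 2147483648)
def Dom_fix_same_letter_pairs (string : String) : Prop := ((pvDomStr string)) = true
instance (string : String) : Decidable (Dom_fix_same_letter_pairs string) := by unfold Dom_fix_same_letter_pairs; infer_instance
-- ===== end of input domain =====

-- B iterates over the string two characters at a time (pair chunks) instead of
-- indexing every position and branching on i % 2; same cost, different decomposition.


-- ===== PORT A =====
-- A: for i in range(len(string)): if i odd and string[i-1] == string[i] append 'X'
-- else append string[i]; accumulated as a list of chars, String.mk at the end.
-- Indices are always in range, so getD's default is never used.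
def fix_same_letter_pairs (string : String) : String :=
  let cs := string.toList
  String.mk ((List.range cs.length).foldl
    (fun acc i =>
      if i % 2 = 1 ∧ cs.getD (i - 1) ' ' = cs.getD i ' ' then acc ++ ['X']
      else acc ++ [cs.getD i ' ']) [])

-- ===== PORT B =====
-- B: consume the char list two at a time (the step-2 chunk loop of Source B);
-- a pair of equal chars becomes [c, 'X'], otherwise the chunk is kept as is.
def fix_same_letter_pairs_chunks : List Char → List Char
  | [] => []
  | [a] => [a]
  | a :: b :: rest =>
      (if a = b then [a, 'X'] else [a, b]) ++ fix_same_letter_pairs_chunks rest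

def fix_same_letter_pairs_alt (string : String) : String :=
  String.mk (fix_same_letter_pairs_chunks string.toList)

-- ===== PRECONDITION & SPEC =====
def Spec_fix_same_letter_pairs (string : String) (out : String) : Prop := out = fix_same_letter_pairs_alt string
instance (string : String) (out : String) : Decidable (Spec_fix_same_letter_pairs string out) := by unfold Spec_fix_same_letter_pairs; infer_instance

-- ===== CLAIM (what is proved, stated in full; the proofs are below) =====
def Claim_equal_fix_same_letter_pairs : Prop := ∀ (string : String), Dom_fix_same_letter_pairs string → Spec_fix_same_letter_pairs string (fix_same_letter_pairs string)

-- ===== LEMMAS AND PROOFS =====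

-- the per-index emission of A's loop
def pvEmit (cs : List Char) (i : Nat) : List Char :=
  if i % 2 = 1 ∧ cs.getD (i - 1) ' ' = cs.getD i ' ' then ['X'] else [cs.getD i ' ']

theorem pvFoldA (cs : List Char) (l : List Nat) (acc : List Char) :
    l.foldl (fun acc i =>
      if i % 2 = 1 ∧ cs.getD (i - 1) ' ' = cs.getD i ' ' then acc ++ ['X']
      else acc ++ [cs.getD i ' ']) acc = acc ++ l.flatMap (pvEmit cs) := by
  induction l generalizing acc with
  | nil => simp
  | cons x xs ih =>
      simp only [List.foldl_cons, List.flatMap_cons, pvEmit]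
      split_ifs with h <;> rw [ih] <;> simp

theorem pvEmit_shift (a b : Char) (rest : List Char) (i : Nat) :
    pvEmit (a :: b :: rest) (i + 2) = pvEmit rest i := by
  unfold pvEmit
  match i with
  | 0 => simp
  | Nat.succ j =>
      have h2 : (j + 1 + 2) % 2 = (j + 1) % 2 := Nat.add_mod_right _ _
      simp [h2, List.getD]

theorem pvMain (cs : List Char) :
    (List.range cs.length).flatMap (pvEmit cs) = fix_same_letter_pairs_chunks cs := by
  induction cs using fix_same_letter_pairs_chunks.induct with
  | case1 => simp [fix_same_letter_pairs_chunks]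
  | case2 a => simp [fix_same_letter_pairs_chunks, pvEmit]
  | case3 a b rest ih =>
      have hr : List.range (rest.length + 2)
          = 0 :: 1 :: (List.range rest.length).map (· + 2) := by
        rw [List.range_succ_eq_map, List.range_succ_eq_map]
        simp [List.map_map, Function.comp_def, Nat.add_comm, Nat.add_left_comm]
      simp only [fix_same_letter_pairs_chunks, List.length_cons, hr,
        List.flatMap_cons, List.flatMap_map]
      have he : (fun i => pvEmit (a :: b :: rest) (i + 2)) = pvEmit rest :=
        funext (pvEmit_shift a b rest)
      rw [he, ih]
      by_cases hab : a = b <;> simp [pvEmit, hab]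

-- ===== VERDICT (by name: the statement is the Claim_ definition above) =====
theorem fix_same_letter_pairs_spec : Claim_equal_fix_same_letter_pairs := by
  intro s _
  unfold Spec_fix_same_letter_pairs fix_same_letter_pairs fix_same_letter_pairs_alt
  simp only [pvFoldA, List.nil_append, pvMain]
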